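-- pv_equiv track=rewrite | github.com/voaidesr/prosperity-4-dashboard | tools/algo_diff.py | compare_constants
-- ===== SOURCE A (Python) =====
-- from typing import Any
--
-- def compare_constants(old: dict[str, Any], new: dict[str, Any]) -> list[str]:
--     """Build human-readable constant changes."""
--
--     rows = []
--     old_keys = set(old)
--     new_keys = set(new)
--     for key in sorted(old_keys - new_keys):
--         rows.append(f"- Removed hyperparameter `{key}` = {old[key]!r}")
--     for key in sorted(new_keys - old_keys):
--         rows.append(f"- Added hyperparameter `{key}` = {new[key]!r}")
--     for key in sorted(old_keys & new_keys):
--         if old[key] != new[key]: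
--             rows.append(f"- Changed `{key}`: {old[key]!r} -> {new[key]!r}")
--     return rows
-- ===== SOURCE B (Python) =====
-- def compare_constants(old, new):
--     """Build human-readable constant changes."""
--     removed, added, changed = [], [], []
--     for key in sorted(set(old) | set(new)):
--         if key not in new:
--             removed.append(f"- Removed hyperparameter `{key}` = {old[key]!r}")
--         elif key not in old:
--             added.append(f"- Added hyperparameter `{key}` = {new[key]!r}")
--         elif old[key] != new[key]:
--             changed.append(f"- Changed `{key}`: {old[key]!r} -> {new[key]!r}")
--     return removed + added + changed
-- ===== Notes on version B (the rewrite author's own statement) =====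
-- stated objective: simpler
-- what changed: Replaces A's three set-difference/intersection computations and three separate sorts by one sort of the key union and a single pass that buckets each key into removed/added/changed lists, concatenated at the end.
import Mathlib
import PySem

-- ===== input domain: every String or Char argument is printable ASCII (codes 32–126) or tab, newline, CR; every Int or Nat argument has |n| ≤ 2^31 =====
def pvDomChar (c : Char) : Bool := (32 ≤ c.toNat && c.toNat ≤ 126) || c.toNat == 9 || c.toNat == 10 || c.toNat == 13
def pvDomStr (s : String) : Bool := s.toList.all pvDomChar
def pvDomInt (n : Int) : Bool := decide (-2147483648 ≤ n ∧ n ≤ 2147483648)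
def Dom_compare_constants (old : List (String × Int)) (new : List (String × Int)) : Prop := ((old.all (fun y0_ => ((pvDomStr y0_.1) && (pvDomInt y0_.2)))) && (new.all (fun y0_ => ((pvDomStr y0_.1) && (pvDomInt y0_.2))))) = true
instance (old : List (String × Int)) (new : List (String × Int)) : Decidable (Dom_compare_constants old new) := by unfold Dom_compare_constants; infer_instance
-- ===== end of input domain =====

-- B replaces A's three set operations and three sorts by one sort of the key union and a single
-- bucketing pass (removed/added/changed lists, concatenated) — same output, simpler traversal.


-- ===== PORT A =====
-- A and B only differ in traversal; the three f-string formats are shared helpers.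
def fmtRemoved (k : String) (v : Int) : String :=
  "- Removed hyperparameter `" ++ k ++ "` = " ++ PySem.Int.toStr v

def fmtAdded (k : String) (v : Int) : String :=
  "- Added hyperparameter `" ++ k ++ "` = " ++ PySem.Int.toStr v

def fmtChanged (k : String) (vo vn : Int) : String :=
  "- Changed `" ++ k ++ "`: " ++ PySem.Int.toStr vo ++ " -> " ++ PySem.Int.toStr vn

def compare_constants (old : List (String × Int)) (new : List (String × Int)) : List String :=
  let dOld := PySem.Dict.ofList old
  let dNew := PySem.Dict.ofList new
  let oldKeys : PySem.Set String := PySem.Set.ofList dOld.keys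
  let newKeys : PySem.Set String := PySem.Set.ofList dNew.keys
  let rows : List String :=
    (PySem.List.sorted (PySem.Set.diff oldKeys newKeys) (fun k => k) false).foldl
      (fun rows key => rows ++ [fmtRemoved key (dOld.getD key 0)]) []
  let rows :=
    (PySem.List.sorted (PySem.Set.diff newKeys oldKeys) (fun k => k) false).foldl
      (fun rows key => rows ++ [fmtAdded key (dNew.getD key 0)]) rows
  let rows :=
    (PySem.List.sorted (PySem.Set.inter oldKeys newKeys) (fun k => k) false).foldl
      (fun rows key =>
        if dOld.getD key 0 != dNew.getD key 0 then
          rows ++ [fmtChanged key (dOld.getD key 0) (dNew.getD key 0)]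
        else rows) rows
  rows

-- ===== PORT B =====
-- B's loop body (the if/elif chain appending to one of the three buckets)
def bucketStep (dOld dNew : PySem.Dict String Int)
    (acc : List String × List String × List String) (key : String) :
    List String × List String × List String :=
  let (removed, added, changed) := acc
  if !(dNew.contains key) then
    (removed ++ [fmtRemoved key (dOld.getD key 0)], added, changed)
  else if !(dOld.contains key) then
    (removed, added ++ [fmtAdded key (dNew.getD key 0)], changed)
  else if dOld.getD key 0 != dNew.getD key 0 then
    (removed, added, changed ++ [fmtChanged key (dOld.getD key 0) (dNew.getD key 0)])
  else acc

def compare_constants_alt (old : List (String × Int)) (new : List (String × Int)) : List String :=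
  let dOld := PySem.Dict.ofList old
  let dNew := PySem.Dict.ofList new
  let buckets :=
    (PySem.List.sorted
        (PySem.Set.union (PySem.Set.ofList dOld.keys) dNew.keys) (fun k => k) false).foldl
      (bucketStep dOld dNew) ([], [], [])
  buckets.1 ++ buckets.2.1 ++ buckets.2.2

-- ===== PRECONDITION & SPEC =====
def Spec_compare_constants (old : List (String × Int)) (new : List (String × Int)) (out : List String) : Prop := out = compare_constants_alt old new
instance (old : List (String × Int)) (new : List (String × Int)) (out : List String) : Decidable (Spec_compare_constants old new out) := by unfold Spec_compare_constants; infer_instance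

-- ===== CLAIM (what is proved, stated in full; the proofs are below) =====
def Claim_equal_compare_constants : Prop := ∀ (old : List (String × Int)) (new : List (String × Int)), Dom_compare_constants old new → Spec_compare_constants old new (compare_constants old new)

-- ===== LEMMAS AND PROOFS =====

theorem pv_contains_iff (d : PySem.Dict String Int) (k : String) :
    d.contains k = true ↔ k ∈ d.keys := by
  simp only [PySem.Dict.contains, PySem.Dict.keys, List.any_eq_true, List.mem_map, beq_iff_eq]

-- B's bucketing fold, characterised: three filtered-and-mapped sublists
theorem pv_bucket_fold (dOld dNew : PySem.Dict String Int) (ks : List String)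
    (r a c : List String) :
    ks.foldl (bucketStep dOld dNew) (r, a, c)
    = (r ++ (ks.filter (fun k => !(dNew.contains k))).map
          (fun k => fmtRemoved k (dOld.getD k 0)),
       a ++ (ks.filter (fun k => dNew.contains k && !(dOld.contains k))).map
          (fun k => fmtAdded k (dNew.getD k 0)),
       c ++ (ks.filter (fun k => (dNew.contains k && dOld.contains k) &&
              (dOld.getD k 0 != dNew.getD k 0))).map
          (fun k => fmtChanged k (dOld.getD k 0) (dNew.getD k 0))) := by
  induction ks generalizing r a c with
  | nil => simp
  | cons x xs ih =>
    rw [List.foldl_cons]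
    by_cases h1 : dNew.contains x = true
    · by_cases h2 : dOld.contains x = true
      · by_cases h3 : (dOld.getD x 0 != dNew.getD x 0) = true
        · have hstep : bucketStep dOld dNew (r, a, c) x
              = (r, a, c ++ [fmtChanged x (dOld.getD x 0) (dNew.getD x 0)]) := by
            simp [bucketStep, h1, h2, h3]
          rw [hstep, ih]
          simp [h1, h2, h3]
        · have hstep : bucketStep dOld dNew (r, a, c) x = (r, a, c) := by
            simp only [Bool.not_eq_true] at h3
            simp [bucketStep, h1, h2, h3]
          rw [hstep, ih]
          simp only [Bool.not_eq_true] at h3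
          simp [h1, h2, h3]
      · have hstep : bucketStep dOld dNew (r, a, c) x
            = (r, a ++ [fmtAdded x (dNew.getD x 0)], c) := by
          simp only [Bool.not_eq_true] at h2
          simp [bucketStep, h1, h2]
        rw [hstep, ih]
        simp only [Bool.not_eq_true] at h2
        simp [h1, h2]
    · have hstep : bucketStep dOld dNew (r, a, c) x
          = (r ++ [fmtRemoved x (dOld.getD x 0)], a, c) := by
        simp only [Bool.not_eq_true] at h1
        simp [bucketStep, h1]
      rw [hstep, ih]
      simp only [Bool.not_eq_true] at h1
      simp [h1]

-- a sorted set expression is the matching filter of the sorted key union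
theorem pv_sorted_eq_filter {s U : List String} {p : String → Bool}
    (hU : U.Pairwise (· < ·)) (hs : s.Nodup)
    (hmem : ∀ k, k ∈ s ↔ k ∈ U ∧ p k = true) :
    PySem.List.sorted s (fun k => k) false = U.filter p := by
  apply PySem.List.sorted_eq_of_perm_of_pairwise_lt
  · rw [List.perm_ext_iff_of_nodup (List.Nodup.filter _ hU.nodup) hs]
    intro k
    simp [List.mem_filter, hmem k]
  · exact hU.filter p

theorem compare_constants_eq (old new : List (String × Int)) :
    compare_constants old new = compare_constants_alt old new := by
  unfold compare_constants compare_constants_alt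
  dsimp only
  rw [PySem.Set.ofList_eq_self_of_nodup _ (PySem.Dict.nodup_keys_ofList old),
      PySem.Set.ofList_eq_self_of_nodup _ (PySem.Dict.nodup_keys_ofList new)]
  set dOld := PySem.Dict.ofList old with hdo
  set dNew := PySem.Dict.ofList new with hdn
  set oldK : List String := dOld.keys with hok
  set newK : List String := dNew.keys with hnk
  set U : List String := PySem.List.sorted (PySem.Set.union oldK newK) (fun k => k) false with hU
  have hndo : oldK.Nodup := PySem.Dict.nodup_keys_ofList old
  have hndn : newK.Nodup := PySem.Dict.nodup_keys_ofList new
  have hUnd : U.Nodup := (PySem.List.sorted_perm _ _ _).nodup_iff.mpr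
    (PySem.Set.nodup_union _ _ hndo)
  have hUlt : U.Pairwise (· < ·) := by
    have hle := PySem.List.sorted_pairwise (PySem.Set.union oldK newK) (fun k => k)
    rw [← hU] at hle
    exact (hle.and (List.nodup_iff_pairwise_ne.mp hUnd)).imp
      (fun h => lt_of_le_of_ne h.1 h.2)
  have hmemU : ∀ k, k ∈ U ↔ k ∈ oldK ∨ k ∈ newK := by
    intro k
    rw [hU, (PySem.List.sorted_perm _ _ _).mem_iff, PySem.Set.mem_union]
  have h1 : PySem.List.sorted (PySem.Set.diff oldK newK) (fun k => k) false
      = U.filter (fun k => !(dNew.contains k)) := by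
    apply pv_sorted_eq_filter hUlt (List.Nodup.filter _ hndo)
    intro k
    have hc := pv_contains_iff dNew k
    simp only [List.mem_filter, PySem.Set.contains, List.contains_iff_mem,
      hmemU k, Bool.not_eq_true', Bool.eq_false_iff, Ne, hc]
    constructor
    · rintro ⟨hk, hn⟩; exact ⟨Or.inl hk, hn⟩
    · rintro ⟨hk | hk, hn⟩
      · exact ⟨hk, hn⟩
      · exact absurd hk hn
  have h2 : PySem.List.sorted (PySem.Set.diff newK oldK) (fun k => k) false
      = U.filter (fun k => dNew.contains k && !(dOld.contains k)) := by
    apply pv_sorted_eq_filter hUlt (List.Nodup.filter _ hndn)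
    intro k
    have hcn := pv_contains_iff dNew k
    have hco := pv_contains_iff dOld k
    simp only [List.mem_filter, PySem.Set.contains, List.contains_iff_mem,
      hmemU k, Bool.and_eq_true, Bool.not_eq_true', Bool.eq_false_iff, Ne, hcn, hco]
    constructor
    · rintro ⟨hk, ho⟩; exact ⟨Or.inr hk, hk, ho⟩
    · rintro ⟨_, hn, ho⟩; exact ⟨hn, ho⟩
  have h3 : PySem.List.sorted (PySem.Set.inter oldK newK) (fun k => k) false
      = U.filter (fun k => dNew.contains k && dOld.contains k) := by
    apply pv_sorted_eq_filter hUlt (List.Nodup.filter _ hndo)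
    intro k
    have hcn := pv_contains_iff dNew k
    have hco := pv_contains_iff dOld k
    simp only [List.mem_filter, PySem.Set.contains, List.contains_iff_mem,
      hmemU k, Bool.and_eq_true, hcn, hco]
    tauto
  simp only [pv_bucket_fold, PySem.List.foldl_append_singleton_eq_map,
    PySem.List.foldl_append_if, List.nil_append, h1, h2, h3, List.filter_filter,
    List.append_assoc]
  have hpred : (fun a => dOld.getD a 0 != dNew.getD a 0 && (dNew.contains a && dOld.contains a))
      = (fun k => dNew.contains k && dOld.contains k && (dOld.getD k 0 != dNew.getD k 0)) := by
    funext k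
    cases dNew.contains k <;> cases dOld.contains k <;>
      cases dOld.getD k 0 != dNew.getD k 0 <;> rfl
  rw [hpred]

-- ===== VERDICT (by name: the statement is the Claim_ definition above) =====
theorem compare_constants_spec : Claim_equal_compare_constants := by
  intro old new _dom
  unfold Spec_compare_constants
  exact compare_constants_eq old new
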